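-- pv_equiv track=rewrite | github.com/YuchenLi27/MechineLearningProject | src/dataset_cs.py | make_switch_and_duration
-- ===== SOURCE A (Python) =====
-- def make_switch_and_duration(langs, small_max=2, med_max=5):
--     """
--     Skip-other label:
--     - current_lang: 最近的非 other 语言（在 t 或 t 左侧）
--     - next_lang: t 右侧第一个非 other 语言
--     - switch_next[t] = 1 if current_lang != next_lang
--     - duration3[t]：只在 switch 点定义，统计 next_lang 语言段长度（忽略 other）
--     """
--     n = len(langs)
--     switch_next = [-100] * n
--     dur3 = [-100] * n
--
--     # next non-other index for each t
--     next_non_other = [-1] * n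
--     nxt = -1
--     for i in range(n - 1, -1, -1):
--         next_non_other[i] = nxt
--         if langs[i] != "other":
--             nxt = i
--
--     # prev non-other language for each t
--     prev_lang = ["other"] * n
--     last = "other"
--     for i in range(n):
--         if langs[i] != "other":
--             last = langs[i]
--         prev_lang[i] = last
--
--     for t in range(n):
--         cur = prev_lang[t]
--         j = next_non_other[t]
--         if cur == "other" or j == -1:
--             switch_next[t] = -100
--             continue
--
--         nxt_lang = langs[j]
--         sw = int(cur != nxt_lang)
--         switch_next[t] = sw
--
--         if sw == 1:
--             # count length of upcoming segment starting at j (ignore other)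
--             L = 0
--             k = j
--             while k < n:
--                 if langs[k] == "other":
--                     k += 1
--                     continue
--                 if langs[k] != nxt_lang:
--                     break
--                 L += 1
--                 k += 1
--
--             if L <= small_max:
--                 dur3[t] = 0
--             elif L <= med_max:
--                 dur3[t] = 1
--             else:
--                 dur3[t] = 2
--
--     return switch_next, dur3
-- ===== SOURCE B (Python) =====
-- def make_switch_and_duration(langs, small_max=2, med_max=5):
--     n = len(langs)
--     # right-to-left pass: for each t, the language of the first non-other token
--     # strictly after t (None if there is none) and the length of its segment
--     # (ignoring "other"), computed by DP in O(n) total.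
--     rows = [None] * n
--     nl, sl = None, 0
--     for i in range(n - 1, -1, -1):
--         rows[i] = (nl, sl)
--         if langs[i] != "other":
--             sl = sl + 1 if nl == langs[i] else 1
--             nl = langs[i]
--     # left-to-right pass: thread the most recent non-other language and emit both labels.
--     switch_next, dur3 = [], []
--     cur = "other"
--     for i in range(n):
--         if langs[i] != "other":
--             cur = langs[i]
--         nl, sl = rows[i]
--         if nl is None or cur == "other":
--             switch_next.append(-100)
--             dur3.append(-100)
--         elif cur == nl:
--             switch_next.append(0)
--             dur3.append(-100)
--         else:
--             switch_next.append(1)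
--             dur3.append(0 if sl <= small_max else 1 if sl <= med_max else 2)
--     return switch_next, dur3
-- ===== Notes on version B (the rewrite author's own statement) =====
-- stated objective: alternative
-- what changed: A rescans the upcoming segment with an inner while loop at every switch point; B instead computes the next non-other language and its segment length for every position by a right-to-left dynamic-programming pass and emits both label lists in a single forward pass.
import Mathlib
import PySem

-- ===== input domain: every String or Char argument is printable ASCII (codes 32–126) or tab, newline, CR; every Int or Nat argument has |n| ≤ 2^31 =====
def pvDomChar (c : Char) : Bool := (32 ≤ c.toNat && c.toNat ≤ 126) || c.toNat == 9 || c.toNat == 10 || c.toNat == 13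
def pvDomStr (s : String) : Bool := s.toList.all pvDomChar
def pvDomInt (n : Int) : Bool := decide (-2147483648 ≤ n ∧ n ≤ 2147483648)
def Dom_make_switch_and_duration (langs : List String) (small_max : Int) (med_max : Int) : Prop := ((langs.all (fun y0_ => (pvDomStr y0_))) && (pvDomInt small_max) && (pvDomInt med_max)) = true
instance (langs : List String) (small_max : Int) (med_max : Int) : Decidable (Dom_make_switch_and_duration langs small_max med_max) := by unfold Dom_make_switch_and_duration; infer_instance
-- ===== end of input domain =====

-- ===== PORT A =====
-- B replaces A's per-switch-point rescanning while-loop by a right-to-left DP over segment lengths plus one forward emitting pass (single-pass alternative; timing not conclusively faster on generated inputs).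
-- In all ports, `xs[i]?.getD d` is Python's in-range `xs[i]` (every access below is provably in range).

-- A: `for i in range(n-1,-1,-1): next_non_other[i]=nxt; if langs[i]!="other": nxt=i`
def pvA_nextLoop (langs : List String) : Nat → Int → List Int → List Int
  | 0, _, acc => acc
  | i + 1, nxt, acc =>
      pvA_nextLoop langs i (if langs[i]?.getD "" ≠ "other" then (i : Int) else nxt) (nxt :: acc)

-- A: `for i in range(n): if langs[i]!="other": last=langs[i]; prev_lang[i]=last`
def pvA_prevLoop (langs : List String) (last : String) : List String :=
  match langs with
  | [] => []
  | l :: ls =>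
      let last' := if l ≠ "other" then l else last
      last' :: pvA_prevLoop ls last'

-- A's inner `while k < n: ...` loop counting the upcoming segment length
def pvA_while (langs : List String) (n : Nat) (nl : String) (k : Nat) (L : Int) : Int :=
  if _h : k < n then
    if langs[k]?.getD "" = "other" then pvA_while langs n nl (k + 1) L
    else if langs[k]?.getD "" ≠ nl then L
    else pvA_while langs n nl (k + 1) (L + 1)
  else L
termination_by n - k

def make_switch_and_duration (langs : List String) (small_max : Int) (med_max : Int) : List Int × List Int :=
  let n := langs.length
  let next_non_other := pvA_nextLoop langs n (-1) []
  let prev_lang := pvA_prevLoop langs "other"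
  let cells := (List.range n).map (fun t =>
    let cur := prev_lang[t]?.getD "other"
    let j := next_non_other[t]?.getD (-1)
    if cur = "other" ∨ j = -1 then ((-100 : Int), (-100 : Int))
    else
      -- j ≥ 0 whenever j ≠ -1 (it is a stored list index), so toNat is exact here
      let nxt_lang := langs[j.toNat]?.getD ""
      let sw : Int := if cur ≠ nxt_lang then 1 else 0
      if sw = 1 then
        let L := pvA_while langs n nxt_lang j.toNat 0
        (sw, if L ≤ small_max then (0 : Int) else if L ≤ med_max then 1 else 2)
      else (sw, -100))
  (cells.map Prod.fst, cells.map Prod.snd)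

-- ===== PORT B =====
-- B's right-to-left pass: (next non-other lang, its segment length, the row for each position)
def pvB_scan (langs : List String) : Option String × Int × List (Option String × Int) :=
  match langs with
  | [] => (none, 0, [])
  | l :: ls =>
      let (nl, sl, rows) := pvB_scan ls
      if l ≠ "other" then (some l, if nl = some l then sl + 1 else 1, (nl, sl) :: rows)
      else (nl, sl, (nl, sl) :: rows)

-- B's left-to-right pass, threading the most recent non-other language
def pvB_emit (small med : Int) (cur : String) : List String → List (Option String × Int) → List (Int × Int)
  | [], _ => []
  | _ :: _, [] => []
  | l :: ls, (nl, sl) :: rest =>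
      let cur' := if l ≠ "other" then l else cur
      let cell : Int × Int :=
        match nl with
        | none => (-100, -100)
        | some nlv =>
            if cur' = "other" then (-100, -100)
            else if cur' = nlv then (0, -100)
            else (1, if sl ≤ small then 0 else if sl ≤ med then 1 else 2)
      cell :: pvB_emit small med cur' ls rest

def make_switch_and_duration_alt (langs : List String) (small_max : Int) (med_max : Int) : List Int × List Int :=
  let cells := pvB_emit small_max med_max "other" langs (pvB_scan langs).2.2
  (cells.map Prod.fst, cells.map Prod.snd)

-- ===== PRECONDITION & SPEC =====
def Spec_make_switch_and_duration (langs : List String) (small_max : Int) (med_max : Int) (out : List Int × List Int) : Prop := out = make_switch_and_duration_alt langs small_max med_max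
instance (langs : List String) (small_max : Int) (med_max : Int) (out : List Int × List Int) : Decidable (Spec_make_switch_and_duration langs small_max med_max out) := by unfold Spec_make_switch_and_duration; infer_instance

-- ===== CLAIM (what is proved, stated in full; the proofs are below) =====
def Claim_equal_make_switch_and_duration : Prop := ∀ (langs : List String) (small_max : Int) (med_max : Int), Dom_make_switch_and_duration langs small_max med_max → Spec_make_switch_and_duration langs small_max med_max (make_switch_and_duration langs small_max med_max)

-- ===== LEMMAS AND PROOFS =====

-- reference: (language of first non-other element, length of its segment ignoring "other")
def refNI (ls : List String) : Option String × Int :=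
  match ls with
  | [] => (none, 0)
  | l :: ls => if l = "other" then refNI ls
               else (some l, if (refNI ls).1 = some l then (refNI ls).2 + 1 else 1)

def cellAt (s m : Int) (cur : String) (ni : Option String × Int) : Int × Int :=
  match ni.1 with
  | none => (-100, -100)
  | some nlv =>
      if cur = "other" then (-100, -100)
      else if cur = nlv then (0, -100)
      else (1, if ni.2 ≤ s then 0 else if ni.2 ≤ m then 1 else 2)

def refCells (s m : Int) (cur : String) : List String → List (Int × Int)
  | [] => []
  | l :: ls =>
      let cur' := if l = "other" then cur else l
      cellAt s m cur' (refNI ls) :: refCells s m cur' ls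

-- A's per-index cell expression (proof-only abbreviation; definitionally A's map body)
def cellAfun (langs : List String) (s m : Int) (t : Nat) : Int × Int :=
  let cur := (pvA_prevLoop langs "other")[t]?.getD "other"
  let j := (pvA_nextLoop langs langs.length (-1) [])[t]?.getD (-1)
  if cur = "other" ∨ j = -1 then ((-100 : Int), (-100 : Int))
  else
    let nxt_lang := langs[j.toNat]?.getD ""
    let sw : Int := if cur ≠ nxt_lang then 1 else 0
    if sw = 1 then
      let L := pvA_while langs langs.length nxt_lang j.toNat 0
      (sw, if L ≤ s then (0 : Int) else if L ≤ m then 1 else 2)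
    else (sw, -100)

-- ---------- B side ----------
theorem pvB_scan_fst (ls : List String) :
    ((pvB_scan ls).1, (pvB_scan ls).2.1) = refNI ls := by
  induction ls with
  | nil => rfl
  | cons l ls ih =>
      simp only [pvB_scan, refNI]
      by_cases h : l = "other" <;>
        simp [h, ← ih]

theorem pvB_emit_eq_refCells (s m : Int) (ls : List String) : ∀ cur,
    pvB_emit s m cur ls (pvB_scan ls).2.2 = refCells s m cur ls := by
  induction ls with
  | nil => intro cur; rfl
  | cons l ls ih =>
      intro cur
      have hni := pvB_scan_fst ls
      simp only [pvB_scan]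
      by_cases h : l = "other" <;>
        simp [pvB_emit, refCells, h, ih, cellAt, ← hni]

-- ---------- A side ----------
def wcount (nl : String) : List String → Int
  | [] => 0
  | l :: ls => if l = "other" then wcount nl ls else if l ≠ nl then 0 else 1 + wcount nl ls

theorem wcount_eq_refNI (nl : String) (s : List String) :
    wcount nl s = if (refNI s).1 = some nl then (refNI s).2 else 0 := by
  induction s with
  | nil => simp [wcount, refNI]
  | cons l ls ih =>
      by_cases h : l = "other"
      · simp [wcount, refNI, h, ih]
      · by_cases h2 : l = nl
        · subst h2; simp [wcount, refNI, h, ih]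
          split_ifs <;> ring
        · simp [wcount, refNI, h, h2]

theorem pvA_while_eq_wcount (langs : List String) (nl : String) :
    ∀ k L, pvA_while langs langs.length nl k L = L + wcount nl (langs.drop k) := by
  intro k
  induction hdm : langs.length - k using Nat.strongRecOn generalizing k with
  | _ d ih =>
  intro L
  rw [pvA_while]
  by_cases h : k < langs.length
  · have hd : langs.drop k = langs[k]?.getD "" :: langs.drop (k + 1) := by
      rw [List.getElem?_eq_getElem h]
      exact List.drop_eq_getElem_cons h
    simp only [h, dif_pos]
    by_cases h1 : langs[k]?.getD "" = "other"
    · rw [if_pos h1, ih (langs.length - (k + 1)) (by omega) (k + 1) rfl, hd, wcount,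
        if_pos h1]
    · rw [if_neg h1]
      by_cases h2 : langs[k]?.getD "" = nl
      · rw [if_neg (by simpa using h2), ih (langs.length - (k + 1)) (by omega) (k + 1) rfl,
          hd, wcount, if_neg h1, if_neg (by simpa using h2)]
        ring
      · rw [if_pos (by simpa using h2), hd, wcount, if_neg h1, if_pos (by simpa using h2)]
        ring
  · rw [dif_neg h, List.drop_eq_nil_of_le (by omega : langs.length ≤ k)]
    simp [wcount]

-- first index in [lo, hi) whose element is non-"other", else nxt
def gIdx (langs : List String) (nxt : Int) (lo hi : Nat) : Int :=
  if _h : lo < hi then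
    if langs[lo]?.getD "" ≠ "other" then (lo : Int) else gIdx langs nxt (lo + 1) hi
  else nxt
termination_by hi - lo

theorem gIdx_stop (langs : List String) (nxt : Int) (lo : Nat) :
    gIdx langs nxt lo lo = nxt := by
  rw [gIdx]; simp

theorem gIdx_shrink (langs : List String) (nxt : Int) (i : Nat) :
    ∀ lo, lo ≤ i →
      gIdx langs nxt lo (i + 1) =
        gIdx langs (if langs[i]?.getD "" ≠ "other" then (i : Int) else nxt) lo i := by
  intro lo h
  induction hdm : i - lo using Nat.strongRecOn generalizing lo with
  | _ d ih =>
  by_cases hlt : lo < i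
  · conv_lhs => rw [gIdx]
    conv_rhs => rw [gIdx]
    rw [dif_pos (Nat.lt_succ_of_lt hlt), dif_pos hlt]
    by_cases hx : langs[lo]?.getD "" = "other"
    · rw [if_neg (by simpa using hx), if_neg (by simpa using hx)]
      exact ih (i - (lo + 1)) (by omega) (lo + 1) (by omega) rfl
    · rw [if_pos (by simpa using hx), if_pos (by simpa using hx)]
  · have hlo : lo = i := by omega
    subst hlo
    conv_lhs => rw [gIdx]
    rw [dif_pos (Nat.lt_succ_self lo), gIdx_stop, gIdx_stop]

theorem pvA_nextLoop_eq (langs : List String) :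
    ∀ (i : Nat) (nxt : Int) (acc : List Int),
      pvA_nextLoop langs i nxt acc =
        ((List.range i).map (fun k => gIdx langs nxt (k + 1) i)) ++ acc := by
  intro i
  induction i with
  | zero => intro nxt acc; simp [pvA_nextLoop]
  | succ i ih =>
      intro nxt acc
      rw [pvA_nextLoop, ih, List.range_succ]
      simp only [List.map_append, List.map_cons, List.map_nil, List.append_assoc]
      congr 1
      · apply List.map_congr_left
        intro k hk
        simp only [List.mem_range] at hk
        exact (gIdx_shrink langs nxt i (k + 1) (by omega)).symm
      · simp only [List.cons_append, List.nil_append]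
        congr 1
        exact (gIdx_stop langs nxt (i + 1)).symm

-- combined characterisation of the next-non-other index against refNI
theorem gIdx_refNI (langs : List String) : ∀ lo,
    (gIdx langs (-1) lo langs.length = -1 ∧ (refNI (langs.drop lo)).1 = none)
    ∨ (∃ k : Nat, gIdx langs (-1) lo langs.length = (k : Int) ∧ k < langs.length ∧
          langs[k]?.getD "" ≠ "other" ∧
          refNI (langs.drop lo) = refNI (langs.drop k)) := by
  intro lo
  induction hdm : langs.length - lo using Nat.strongRecOn generalizing lo with
  | _ d ih =>
  by_cases h : lo < langs.length
  · have hd : langs.drop lo = langs[lo]?.getD "" :: langs.drop (lo + 1) := by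
      rw [List.getElem?_eq_getElem h]
      exact List.drop_eq_getElem_cons h
    by_cases hx : langs[lo]?.getD "" = "other"
    · rw [gIdx]
      simp only [h, dif_pos]
      rw [if_neg (by simpa using hx)]
      have := ih (langs.length - (lo + 1)) (by omega) (lo + 1) rfl
      rcases this with ⟨h1, h2⟩ | ⟨k, h1, h2, h3, h4⟩
      · left; refine ⟨h1, ?_⟩; rw [hd, refNI, if_pos hx]; exact h2
      · right; exact ⟨k, h1, h2, h3, by rw [hd, refNI, if_pos hx]; exact h4⟩
    · right
      refine ⟨lo, ?_, h, hx, rfl⟩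
      rw [gIdx]
      simp only [h, dif_pos]
      rw [if_pos (by simpa using hx)]
  · left
    constructor
    · rw [gIdx]; simp [h]
    · rw [List.drop_eq_nil_of_le (by omega)]; rfl

def prevAt (cur : String) : List String → Nat → String
  | [], _ => cur
  | l :: _, 0 => if l = "other" then cur else l
  | l :: ls, t + 1 => prevAt (if l = "other" then cur else l) ls t

theorem pvA_prevLoop_getD (ls : List String) :
    ∀ (last : String) (t : Nat), t < ls.length →
      (pvA_prevLoop ls last)[t]?.getD "other" = prevAt last ls t := by
  induction ls with
  | nil => intro _ t ht; simp at ht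
  | cons l ls ih =>
      intro last t ht
      match t with
      | 0 =>
          simp only [pvA_prevLoop, List.getElem?_cons_zero, Option.getD_some, prevAt]
          by_cases h : l = "other" <;> simp [h]
      | t + 1 =>
          simp only [pvA_prevLoop, List.getElem?_cons_succ, prevAt]
          rw [ih _ t (by simpa using Nat.lt_of_succ_lt_succ ht)]
          by_cases h : l = "other" <;> simp [h]

theorem refCells_getD (s m : Int) (ls : List String) :
    ∀ (cur : String) (t : Nat), t < ls.length →
      (refCells s m cur ls)[t]?.getD (0, 0) =
        cellAt s m (prevAt cur ls t) (refNI (ls.drop (t + 1))) := by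
  induction ls with
  | nil => intro _ t ht; simp at ht
  | cons l ls ih =>
      intro cur t ht
      match t with
      | 0 => simp [refCells, prevAt]
      | t + 1 =>
          simp only [refCells, List.getElem?_cons_succ, prevAt, List.drop_succ_cons]
          exact ih _ t (by simpa using Nat.lt_of_succ_lt_succ ht)

theorem refCells_length (s m : Int) (ls : List String) :
    ∀ cur, (refCells s m cur ls).length = ls.length := by
  induction ls with
  | nil => intro; rfl
  | cons l ls ih => intro cur; simp [refCells, ih]

-- A's per-index cell equals the reference cell
theorem cellA_eq (langs : List String) (s m : Int) (t : Nat) (ht : t < langs.length) :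
    cellAfun langs s m t =
      cellAt s m (prevAt "other" langs t) (refNI (langs.drop (t + 1))) := by
  have hprev := pvA_prevLoop_getD langs "other" t ht
  have hnext : (pvA_nextLoop langs langs.length (-1) [])[t]?.getD (-1)
      = gIdx langs (-1) (t + 1) langs.length := by
    rw [pvA_nextLoop_eq, List.append_nil]
    have hlt : t < ((List.range langs.length).map
        (fun k => gIdx langs (-1) (k + 1) langs.length)).length := by simpa using ht
    rw [List.getElem?_eq_getElem hlt]
    simp
  unfold cellAfun
  simp only [hprev, hnext]
  rcases gIdx_refNI langs (t + 1) with ⟨h1, h2⟩ | ⟨k, h1, h2, h3, h4⟩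
  · rw [h1, if_pos (Or.inr rfl), cellAt, h2]
  · rw [h1, h4]
    have hkd : langs.drop k = langs[k]?.getD "" :: langs.drop (k + 1) := by
      rw [List.getElem?_eq_getElem h2]
      exact List.drop_eq_getElem_cons h2
    have hni1 : (refNI (langs.drop k)).1 = some (langs[k]?.getD "") := by
      rw [hkd, refNI, if_neg h3]
    by_cases hc : prevAt "other" langs t = "other"
    · rw [if_pos (Or.inl hc)]
      simp [cellAt, hni1, hc]
    · rw [if_neg (not_or.mpr ⟨hc, by omega⟩)]
      simp only [Int.toNat_natCast]
      by_cases hsw : prevAt "other" langs t = langs[k]?.getD ""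
      · simp [cellAt, hni1, hsw, h3]
      · have hw : pvA_while langs langs.length (langs[k]?.getD "") k 0
            = (refNI (langs.drop k)).2 := by
          rw [pvA_while_eq_wcount, wcount_eq_refNI, hni1]
          simp
        simp [cellAt, hni1, hc, hsw, hw]

theorem make_A_eq_ref (langs : List String) (s m : Int) :
    make_switch_and_duration langs s m =
      ((refCells s m "other" langs).map Prod.fst,
       (refCells s m "other" langs).map Prod.snd) := by
  unfold make_switch_and_duration
  have hcells : (List.range langs.length).map (fun t => cellAfun langs s m t)
      = refCells s m "other" langs := by
    apply List.ext_getElem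
    · simp [refCells_length]
    · intro t h1 h2
      have ht : t < langs.length := by simpa using h1
      simp only [List.getElem_map, List.getElem_range]
      have hr : t < (refCells s m "other" langs).length := by
        rw [refCells_length]; exact ht
      have := refCells_getD s m langs "other" t ht
      rw [List.getElem?_eq_getElem hr, Option.getD_some] at this
      rw [cellA_eq langs s m t ht, ← this]
  exact congrArg (fun c => (c.map Prod.fst, c.map Prod.snd)) hcells

-- ===== VERDICT (by name: the statement is the Claim_ definition above) =====
theorem make_switch_and_duration_spec : Claim_equal_make_switch_and_duration := by
  intro langs s m _
  unfold Spec_make_switch_and_duration make_switch_and_duration_alt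
  rw [make_A_eq_ref, pvB_emit_eq_refCells]
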